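-- pv_equiv track=rewrite | github.com/taleldayekh/sudoku-solver | server/sudoku.py | validate_list_entries
-- ===== SOURCE A (Python) =====
-- from typing import List
--
-- NROWS = 9
--
-- NCOLS = 9
--
-- def validate_list_entries(board: List[int]) -> bool:
--     # Check size
--     if len(board) != NROWS * NCOLS:
--         return False
--     # check all ints
--     for num in board:
--         if isinstance(num, int):
--             continue
--         return False
--     # check number range
--     if max(board) > 9 or min(board) < 0:
--         return False
--     return True
-- ===== SOURCE B (Python) =====
-- def validate_list_entries(board):
--     # Recursive traversal with a position accumulator: walks the list checking each
--     # entry (int, 0..9) and counting it, succeeding only when exactly 81 valid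
--     # entries were consumed; no len(), max() or min() calls, and it stops after at
--     # most 82 elements on oversized input.
--     def go(xs, k):
--         if not xs:
--             return k == 81
--         n = xs[0]
--         if k >= 81 or not isinstance(n, int) or n < 0 or n > 9:
--             return False
--         return go(xs[1:], k + 1)
--     return go(board, 0)
-- ===== Notes on version B (the rewrite author's own statement) =====
-- stated objective: alternative
-- what changed: Replaces A's staged passes (len() guard, isinstance loop, max() and min() scans) with one recursive traversal carrying a position accumulator that checks type and range per element and succeeds only when exactly 81 entries are consumed, with no len/max/min calls.
import Mathlib
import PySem

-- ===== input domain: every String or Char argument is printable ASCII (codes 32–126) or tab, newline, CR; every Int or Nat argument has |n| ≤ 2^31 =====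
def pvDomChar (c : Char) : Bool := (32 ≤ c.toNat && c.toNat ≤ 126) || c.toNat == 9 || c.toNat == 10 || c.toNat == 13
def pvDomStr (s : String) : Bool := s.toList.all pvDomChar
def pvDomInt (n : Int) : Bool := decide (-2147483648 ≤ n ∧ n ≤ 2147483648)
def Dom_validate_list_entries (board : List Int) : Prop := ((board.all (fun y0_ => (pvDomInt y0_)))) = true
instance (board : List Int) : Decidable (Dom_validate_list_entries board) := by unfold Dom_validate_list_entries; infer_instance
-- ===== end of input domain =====

-- B replaces A's staged passes (length guard, type loop, max()/min() scans) by one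
-- recursive traversal with a position accumulator; objective: alternative.

-- ===== PORT A =====
def validate_list_entries (board : List Int) : Bool :=
  -- if len(board) != NROWS * NCOLS: return False
  if board.length ≠ 9 * 9 then false
  else
    -- for num in board: if isinstance(num, int): continue; return False
    -- (under the type convention every element is an int, so the body never returns)
    if board.any (fun _ => false) then false
    else
      -- if max(board) > 9 or min(board) < 0: return False;  return True
      match PySem.List.max? board (fun x => x), PySem.List.min? board (fun x => x) with
      | some mx, some mn => if mx > 9 ∨ mn < 0 then false else true
      | _, _ => false  -- unreachable: length = 81 means board ≠ []

-- ===== PORT B =====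
def vle_go (xs : List Int) (k : Int) : Bool :=
  match xs with
  | [] => decide (k = 81)
  | n :: t => if k ≥ 81 ∨ n < 0 ∨ n > 9 then false else vle_go t (k + 1)

def validate_list_entries_alt (board : List Int) : Bool := vle_go board 0

-- ===== PRECONDITION & SPEC =====
def Spec_validate_list_entries (board : List Int) (out : Bool) : Prop := out = validate_list_entries_alt board
instance (board : List Int) (out : Bool) : Decidable (Spec_validate_list_entries board out) := by unfold Spec_validate_list_entries; infer_instance

-- ===== CLAIM (what is proved, stated in full; the proofs are below) =====
def Claim_equal_validate_list_entries : Prop := ∀ (board : List Int), Dom_validate_list_entries board → Spec_validate_list_entries board (validate_list_entries board)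

-- ===== LEMMAS AND PROOFS =====

-- B's recursion computes "the remaining list brings the count to exactly 81 and all
-- remaining entries are in range".
theorem vle_go_eq (xs : List Int) (k : Int) :
    vle_go xs k =
      (decide (k + (xs.length : Int) = 81) && xs.all (fun n => decide (0 ≤ n ∧ n ≤ 9))) := by
  induction xs generalizing k with
  | nil => simp [vle_go]
  | cons n t ih =>
    simp only [vle_go, List.length_cons, List.all_cons]
    split_ifs with h
    · rcases h with h | h | h
      · have : ¬ (k + ((t.length : Int) + 1) = 81) := by
          have : (0:Int) ≤ (t.length : Int) := Int.natCast_nonneg _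
          omega
        simp [this]
      · have : ¬ (0 ≤ n ∧ n ≤ 9) := by omega
        simp [this]
      · have : ¬ (0 ≤ n ∧ n ≤ 9) := by omega
        simp [this]
    · push_neg at h
      obtain ⟨h1, h2, h3⟩ := h
      rw [ih]
      have hn : (0 ≤ n ∧ n ≤ 9) := ⟨h2, h3⟩
      simp [hn]
      have : k + ((t.length : Int) + 1) = k + 1 + (t.length : Int) := by omega
      rw [this]

-- ===== VERDICT (by name: the statement is the Claim_ definition above) =====
theorem validate_list_entries_spec : Claim_equal_validate_list_entries := by
  intro board _
  unfold Spec_validate_list_entries validate_list_entries validate_list_entries_alt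
  rw [vle_go_eq]
  by_cases h : board.length = 81
  · obtain ⟨x0, t, rfl⟩ : ∃ x0 t, board = x0 :: t := by
      cases board with
      | nil => simp at h
      | cons a b => exact ⟨a, b, rfl⟩
    have hmx : PySem.List.max? (x0 :: t) (fun y => y) = some (t.foldl max x0) :=
      PySem.List.max?_id_cons x0 t
    have hmn : PySem.List.min? (x0 :: t) (fun y => y) = some (t.foldl min x0) :=
      PySem.List.min?_id_cons x0 t
    have hmxmem := PySem.List.max?_mem hmx
    have hmnmem := PySem.List.min?_mem hmn
    have hmxmax := PySem.List.max?_isMax hmx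
    have hmnmin := PySem.List.min?_isMin hmn
    rw [hmx, hmn]
    rw [if_neg (by simp [h] : ¬ (x0 :: t).length ≠ 9 * 9)]
    rw [if_neg (by simp : ¬ ((x0 :: t).any fun _ => false) = true)]
    have hd : decide ((0:Int) + (((x0 :: t).length : Nat) : Int) = 81) = true := by
      simp [h]
    rw [hd, Bool.true_and]
    show (if List.foldl max x0 t > 9 ∨ List.foldl min x0 t < 0 then false else true) =
      (x0 :: t).all fun n => decide (0 ≤ n ∧ n ≤ 9)
    split_ifs with hr
    · cases hb : (x0 :: t).all (fun n => decide (0 ≤ n ∧ n ≤ 9)) with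
      | false => exact (hb ▸ rfl)
      | true =>
        exfalso
        have hall := List.all_eq_true.mp hb
        rcases hr with h9 | h0
        · have := decide_eq_true_eq.mp (hall _ hmxmem); omega
        · have := decide_eq_true_eq.mp (hall _ hmnmem); omega
    · have hb : (x0 :: t).all (fun n => decide (0 ≤ n ∧ n ≤ 9)) = true := by
        refine List.all_eq_true.mpr (fun n hn => ?_)
        have h1 := hmxmax n hn
        have h2 := hmnmin n hn
        simp only [decide_eq_true_eq]
        omega
      rw [hb]
  · have h81 : board.length ≠ 9 * 9 := by simpa using h
    rw [if_pos h81]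
    have hd : decide ((0:Int) + ((board.length : Nat) : Int) = 81) = false := by
      simp; omega
    rw [hd, Bool.false_and]
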